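-- pv_equiv track=rewrite | github.com/AbdeHelala/bioinformatics-projects | python2024-main/assignments/assignment_01.py | number_of_unique
-- ===== SOURCE A (Python) =====
-- def number_of_unique(s, k):
--     kmer_count = {}
--     n = len(s)
--     for i in range( n - k + 1):
--         kmer = s[i:i+k]
--         kmer_count[kmer] = kmer_count.get(kmer, 0) + 1
--     unique_count = 0
--     for count in kmer_count.values():
--         if count == 1:
--             unique_count += 1
--     return unique_count
-- ===== SOURCE B (Python) =====
-- def number_of_unique(s, k):
--     n = len(s)
--     kmers = sorted(s[i:i+k] for i in range(n - k + 1))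
--     if not kmers:
--         return 0
--     total = 0
--     cur = kmers[0]
--     run = 1
--     for km in kmers[1:]:
--         if km == cur:
--             run += 1
--         else:
--             if run == 1:
--                 total += 1
--             cur, run = km, 1
--     if run == 1:
--         total += 1
--     return total
-- ===== Notes on version B (the rewrite author's own statement) =====
-- stated objective: alternative
-- what changed: Replaced the frequency dictionary with sort-then-scan: build the list of k-mers, sort it, and count maximal runs of length exactly 1 in one pass.
import Mathlib
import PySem

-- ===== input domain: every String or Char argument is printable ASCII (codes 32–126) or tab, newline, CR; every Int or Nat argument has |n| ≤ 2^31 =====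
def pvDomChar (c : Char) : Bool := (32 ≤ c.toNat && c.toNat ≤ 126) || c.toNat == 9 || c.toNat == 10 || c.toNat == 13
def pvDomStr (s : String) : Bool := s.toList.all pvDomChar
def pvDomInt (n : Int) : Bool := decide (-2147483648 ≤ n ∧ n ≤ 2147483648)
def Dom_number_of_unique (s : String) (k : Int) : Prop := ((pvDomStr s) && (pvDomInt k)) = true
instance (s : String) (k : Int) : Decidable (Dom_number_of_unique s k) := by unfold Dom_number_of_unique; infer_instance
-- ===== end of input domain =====

-- B replaces A's frequency dictionary by sort-then-scan over the k-mer list (alternative decomposition, same cost class).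
-- Source B's sorted(...) is ported as List.mergeSort (the library sort), and its for-loop as a foldl over the same (cur, run, total) state.

-- ===== PORT A =====
-- literal port of A: build a count dict over the sliding window, then count values equal to 1
def number_of_unique (s : String) (k : Int) : Int :=
  let n : Int := PySem.Str.len s
  let kmer_count : PySem.Dict String Int :=
    (PySem.List.pyRange 0 (n - k + 1) 1).foldl
      (fun d i =>
        d.insert (PySem.Str.slice s (some i) (some (i + k)))
          (d.getD (PySem.Str.slice s (some i) (some (i + k))) 0 + 1))
      PySem.Dict.empty
  kmer_count.values.foldl (fun c v => if v == 1 then c + 1 else c) 0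

-- ===== PORT B =====
-- one step of Source B's for-loop; state = (cur, run, total)
def pvStep (st : String × Int × Int) (km : String) : String × Int × Int :=
  if km == st.1 then (st.1, st.2.1 + 1, st.2.2)
  else (km, 1, if st.2.1 == 1 then st.2.2 + 1 else st.2.2)

-- Source B: if the k-mer list is empty return 0, else run the loop from (kmers[0], 1, 0) and flush the last run
def pvScan : List String → Int
  | [] => 0
  | x :: rest =>
    let st := rest.foldl pvStep (x, 1, 0)
    if st.2.1 == 1 then st.2.2 + 1 else st.2.2

def number_of_unique_alt (s : String) (k : Int) : Int :=
  let n : Int := PySem.Str.len s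
  let kmers := ((PySem.List.pyRange 0 (n - k + 1) 1).map
      (fun i => PySem.Str.slice s (some i) (some (i + k)))).mergeSort
      (fun a b => a ≤ b)
  pvScan kmers

-- ===== PRECONDITION & SPEC =====
def Spec_number_of_unique (s : String) (k : Int) (out : Int) : Prop := out = number_of_unique_alt s k
instance (s : String) (k : Int) (out : Int) : Decidable (Spec_number_of_unique s k out) := by unfold Spec_number_of_unique; infer_instance

-- ===== CLAIM (what is proved, stated in full; the proofs are below) =====
def Claim_equal_number_of_unique : Prop := ∀ (s : String) (k : Int), Dom_number_of_unique s k → Spec_number_of_unique s k (number_of_unique s k)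

-- ===== LEMMAS AND PROOFS =====

-- the common value both sides compute: number of elements of l that occur exactly once in l
def pvN (l : List String) : Int := (l.filter (fun x => l.count x == 1)).length

theorem pvN_perm {l l' : List String} (h : l.Perm l') : pvN l = pvN l' := by
  unfold pvN
  have hpred : (fun x : String => l.count x == 1) = (fun x => l'.count x == 1) :=
    funext fun x => by rw [h.count_eq x]
  rw [hpred, (h.filter _).length_eq]

-- A-side counting loop is a countP
theorem foldl_count_ones (vs : List Int) (c : Int) :
    vs.foldl (fun c v => if v == 1 then c + 1 else c) c = c + vs.countP (fun v => v == 1) := by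
  induction vs generalizing c with
  | nil => simp
  | cons v vs ih =>
    simp only [List.foldl_cons, List.countP_cons, ih]
    by_cases h : v = 1 <;> simp [h] <;> omega

-- countP over a nodup list with the same membership as l, of "occurs once in l", is pvN l
theorem countP_dedup_count_one (l d : List String) (hnd : d.Nodup)
    (hmem : ∀ x, x ∈ d ↔ x ∈ l) :
    (d.countP (fun x => l.count x == 1) : Int) = pvN l := by
  unfold pvN
  have hndl : (l.filter (fun x => l.count x == 1)).Nodup := by
    rw [List.nodup_iff_count_le_one]
    intro x
    by_cases hxm : x ∈ l.filter (fun y => l.count y == 1)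
    · have h1 : l.count x = 1 := by simpa using (List.mem_filter.mp hxm).2
      have hsub : (l.filter (fun y => l.count y == 1)).Sublist l := List.filter_sublist
      have hle : (l.filter (fun y => l.count y == 1)).count x ≤ l.count x :=
        hsub.count_le x
      omega
    · simp [List.count_eq_zero.mpr hxm]
  have hperm : List.Perm (d.filter (fun x => l.count x == 1)) (l.filter (fun x => l.count x == 1)) := by
    rw [List.perm_ext_iff_of_nodup (hnd.filter _) hndl]
    intro x
    simp only [List.mem_filter]
    rw [hmem]
  rw [List.countP_eq_length_filter, hperm.length_eq]

-- proof-side recursive version of Source B's loop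
def pvRunScan (cur : String) (run : Int) (total : Int) : List String → Int
  | [] => if run == 1 then total + 1 else total
  | km :: rest =>
    if km == cur then pvRunScan cur (run + 1) total rest
    else pvRunScan km 1 (if run == 1 then total + 1 else total) rest

-- the foldl of pvStep (plus the final flush) is pvRunScan
theorem foldl_pvStep_eq_runScan (l : List String) : ∀ (cur : String) (run total : Int),
    (let st := l.foldl pvStep (cur, run, total)
     if st.2.1 == 1 then st.2.2 + 1 else st.2.2) = pvRunScan cur run total l := by
  induction l with
  | nil => intro cur run total; rfl
  | cons km rest ih =>
    intro cur run total
    simp only [List.foldl_cons, pvStep, pvRunScan]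
    by_cases h : (km == cur) = true
    · rw [if_pos h, if_pos h]
      exact ih cur (run + 1) total
    · rw [if_neg h, if_neg h]
      exact ih km 1 (if run == 1 then total + 1 else total)

-- B-side scanner characterisation on a sorted tail
theorem pvRunScan_spec (cur : String) (run total : Int) (l : List String)
    (h : (cur :: l).Pairwise (· ≤ ·)) (hrun : 1 ≤ run) :
    pvRunScan cur run total l =
      total + (if run + (l.count cur : Int) = 1 then 1 else 0)
            + ((l.filter (fun x => x ≠ cur ∧ l.count x = 1)).length : Int) := by
  induction l generalizing cur run total with
  | nil =>
    simp only [pvRunScan, List.count_nil]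
    by_cases h1 : run = 1 <;> simp [h1] <;> omega
  | cons y rest ih =>
    have hpair := h
    rw [List.pairwise_cons] at hpair
    obtain ⟨hcur_le, htail⟩ := hpair
    by_cases hyc : y = cur
    · subst hyc
      simp only [pvRunScan, BEq.rfl, if_true]
      rw [ih y (run + 1) total htail (by omega)]
      have hcount : ((y :: rest).count y : Int) = 1 + rest.count y := by
        simp [List.count_cons]; push_cast; ring
      have hfilter : (y :: rest).filter (fun x => x ≠ y ∧ (y :: rest).count x = 1)
          = rest.filter (fun x => x ≠ y ∧ rest.count x = 1) := by
        rw [List.filter_cons]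
        simp only [ne_eq, not_true_eq_false, false_and, decide_false, if_false]
        apply List.filter_congr
        intro x _
        by_cases hx : x = y
        · simp [hx]
        · simp only [ne_eq, hx, not_false_eq_true, true_and, List.count_cons]
          rw [if_neg (by simp only [beq_iff_eq]; exact fun e => hx e.symm)]
          simp
      rw [hcount, hfilter]
      congr 2
      omega
    · have hcy : cur ≤ y := hcur_le y (by simp)
      have hclty : cur < y := lt_of_le_of_ne hcy (fun e => hyc e.symm)
      have hcur_notin : cur ∉ y :: rest := by
        intro hmem
        rcases List.mem_cons.mp hmem with he | hm
        · exact hyc he.symm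
        · have hy_le : y ≤ cur := (List.pairwise_cons.mp htail).1 cur hm
          exact absurd (le_antisymm hcy hy_le) (fun e => hyc e.symm)
      have hcount0 : (y :: rest).count cur = 0 := List.count_eq_zero.mpr hcur_notin
      simp only [pvRunScan]
      rw [if_neg (by simpa using hyc)]
      rw [ih y 1 (if run == 1 then total + 1 else total) htail (le_refl 1)]
      -- split the (y :: rest) filter at its head
      have hsplit : ((y :: rest).filter (fun x => x ≠ cur ∧ (y :: rest).count x = 1)).length
          = (if rest.count y = 0 then 1 else 0)
            + (rest.filter (fun x => x ≠ y ∧ rest.count x = 1)).length := by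
        rw [List.filter_cons]
        have hrest_eq : rest.filter (fun x => decide (x ≠ cur ∧ (y :: rest).count x = 1))
            = rest.filter (fun x => x ≠ y ∧ rest.count x = 1) := by
          apply List.filter_congr
          intro x hx
          have hxc : x ≠ cur := fun e => hcur_notin (e ▸ List.mem_cons_of_mem _ hx)
          by_cases hxy : x = y
          · subst hxy
            have : (x :: rest).count x = 1 + rest.count x := by simp; omega
            have h2 : rest.count x ≠ 0 := fun h0 => (List.count_eq_zero.mp h0) hx
            simp only [ne_eq, hxc, not_false_eq_true, true_and, this]
            simp; omega
          · have hyx : ¬y = x := fun e => hxy e.symm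
            have : (y :: rest).count x = rest.count x := by
              simp [List.count_cons, hxy, hyx]
            simp [hxc, hxy, hyx, this]
        rw [hrest_eq]
        by_cases hy0 : rest.count y = 0
        · have h1 : (y :: rest).count y = 1 := by simp [List.count_cons, hy0]
          simp [hyc, h1, hy0]
          omega
        · have h1 : (y :: rest).count y ≠ 1 := by simp; omega
          simp [hyc, h1, hy0]
      rw [hcount0, hsplit]
      push_cast
      by_cases hr1 : run = 1 <;> by_cases hy0 : rest.count y = 0 <;>
        simp [hr1, hy0] <;> push_cast <;> omega

-- B equals pvN on a sorted list
theorem scan_sorted_eq_pvN (l : List String) (h : l.Pairwise (· ≤ ·)) :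
    pvScan l = pvN l := by
  cases l with
  | nil => simp [pvScan, pvN]
  | cons x rest =>
    show (let st := rest.foldl pvStep (x, 1, 0)
      if st.2.1 == 1 then st.2.2 + 1 else st.2.2) = _
    rw [foldl_pvStep_eq_runScan rest x 1 0]
    rw [pvRunScan_spec x 1 0 rest h (le_refl 1)]
    unfold pvN
    have hcur_count : ∀ z ∈ rest, ((x :: rest).count z = 1) ↔ (z ≠ x ∧ rest.count z = 1) := by
      intro z hz
      by_cases hzx : z = x
      · subst hzx
        have : rest.count z ≠ 0 := fun h0 => (List.count_eq_zero.mp h0) hz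
        simp; omega
      · have hxz : ¬x = z := fun e => hzx e.symm
        simp [List.count_cons, hzx, hxz]
    rw [List.filter_cons]
    have htail_eq : rest.filter (fun z => (x :: rest).count z == 1)
        = rest.filter (fun z => z ≠ x ∧ rest.count z = 1) := by
      apply List.filter_congr
      intro z hz
      have h2 := hcur_count z hz
      rw [Bool.eq_iff_iff]
      simp only [beq_iff_eq, Bool.and_eq_true, decide_eq_true_eq, Bool.not_eq_true',
        decide_eq_false_iff_not]
      tauto
    by_cases h0 : rest.count x = 0
    · have h1 : (x :: rest).count x = 1 := by simp [h0]
      simp [htail_eq, h0]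
      omega
    · have h1 : (x :: rest).count x ≠ 1 := by simp; omega
      simp [h1, htail_eq, h0]

-- the shared backbone: counting-dict pipeline on a list kl equals sort-and-scan on kl
theorem pv_main (kl : List String) :
    ((kl.foldl (fun (d : PySem.Dict String Int) x => d.insert x (d.getD x 0 + 1))
        PySem.Dict.empty).values.foldl (fun c v => if v == 1 then c + 1 else c) 0)
      = pvScan (kl.mergeSort (fun a b => a ≤ b)) := by
  rw [PySem.Dict.foldl_insert_getD_add_one_eq_counter]
  have hvalues : (PySem.Dict.counter kl).values
      = (PySem.Set.ofList kl).map (fun x => (kl.count x : Int)) := by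
    show ((PySem.Dict.counter kl).items.map (·.2)) = _
    rw [PySem.Dict.items_counter, List.map_map]
    rfl
  rw [hvalues, foldl_count_ones, List.countP_map, zero_add]
  have hcomp : ((fun (v : Int) => v == 1) ∘ fun x => (kl.count x : Int))
      = fun x => kl.count x == 1 := by
    funext x
    simp only [Function.comp]
    by_cases h : kl.count x = 1
    · simp [h]
    · have h2 : (kl.count x : Int) ≠ 1 := by exact_mod_cast h
      simp [h, h2]
  rw [hcomp]
  have hpair : (kl.mergeSort (fun a b => a ≤ b)).Pairwise (· ≤ ·) := by
    have := List.sorted_mergeSort (le := fun a b : String => decide (a ≤ b))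
      (fun a b c hab hbc => by
        simp only [decide_eq_true_eq] at *
        exact le_trans hab hbc)
      (fun a b => by
        simp only [Bool.or_eq_true, decide_eq_true_eq]
        exact le_total a b) kl
    exact this.imp (fun h => by simpa using h)
  rw [scan_sorted_eq_pvN _ hpair,
    pvN_perm (List.mergeSort_perm kl (fun a b => a ≤ b))]
  exact countP_dedup_count_one kl (PySem.Set.ofList kl)
    (PySem.Set.nodup_ofList kl) (fun x => PySem.Set.mem_ofList kl x)

-- ===== VERDICT (by name: the statement is the Claim_ definition above) =====
theorem number_of_unique_spec : Claim_equal_number_of_unique := by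
  intro s k _
  unfold Spec_number_of_unique
  simp only [number_of_unique, number_of_unique_alt]
  rw [show (PySem.List.pyRange 0 (PySem.Str.len s - k + 1) 1).foldl
      (fun (d : PySem.Dict String Int) i =>
        d.insert (PySem.Str.slice s (some i) (some (i + k)))
          (d.getD (PySem.Str.slice s (some i) (some (i + k))) 0 + 1))
      PySem.Dict.empty
    = ((PySem.List.pyRange 0 (PySem.Str.len s - k + 1) 1).map
        (fun i => PySem.Str.slice s (some i) (some (i + k)))).foldl
        (fun (d : PySem.Dict String Int) x => d.insert x (d.getD x 0 + 1))
        PySem.Dict.empty from (List.foldl_map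
        (f := fun i => PySem.Str.slice s (some i) (some (i + k)))
        (g := fun (d : PySem.Dict String Int) x => d.insert x (d.getD x 0 + 1))).symm]
  exact pv_main _
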